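-- pv_equiv track=rewrite | github.com/guvkon/codility | lessons/python/9-MaxDoubleSliceSum.py | solution
-- ===== SOURCE A (Python) =====
-- def prefix_sums(A):
--     n = len(A)
--     P = [0] * (n + 1)
--     for k in range(1, n + 1):
--         P[k] = P[k - 1] + A[k - 1]
--     return P
--
-- def solution(A):
--     max_slice = -30000
--     n = len(A)
--     pref = prefix_sums(A)
--     for x in range(0, n - 2):
--         for y in range(x + 1, n - 1):
--             for z in range(y + 1, n):
--                 slice = pref[z] - pref[x + 1] - A[y]
--                 max_slice = max(max_slice, slice)
--     return max_slice
-- ===== SOURCE B (Python) =====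
-- def solution(A):
--     n = len(A)
--     left = [0] * n
--     for i in range(1, n - 1):
--         left[i] = max(0, left[i - 1] + A[i])
--     right = [0] * n
--     for i in range(n - 2, 0, -1):
--         right[i] = max(0, right[i + 1] + A[i])
--     return max(left[y - 1] + right[y + 1] for y in range(1, n - 1))
-- ===== Notes on version B (the rewrite author's own statement) =====
-- stated objective: faster
-- what changed: replaced the O(n^3) brute-force loop over all triples (x,y,z) with the classic O(n) two-pass DP: a left array of best slice sums ending just before each middle index, a right array of best slice sums starting just after it, and one max over the middle index
-- outside the precondition, e.g. on solution([]): A returns -30000, B raises ValueError; on solution([1, 2]): A returns -30000, B raises ValueError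
import Mathlib
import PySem

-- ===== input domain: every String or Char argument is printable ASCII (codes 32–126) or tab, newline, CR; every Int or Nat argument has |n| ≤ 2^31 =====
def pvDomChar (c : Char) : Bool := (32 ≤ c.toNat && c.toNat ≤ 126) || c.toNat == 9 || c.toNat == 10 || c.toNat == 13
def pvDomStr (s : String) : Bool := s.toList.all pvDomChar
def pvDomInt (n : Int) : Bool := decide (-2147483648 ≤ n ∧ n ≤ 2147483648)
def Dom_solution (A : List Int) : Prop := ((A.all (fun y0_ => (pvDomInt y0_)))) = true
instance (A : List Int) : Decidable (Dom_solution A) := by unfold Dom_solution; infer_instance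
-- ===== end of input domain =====

-- B replaces A's O(n^3) triple loop over (x,y,z) with the classic O(n) two-pass DP
-- (best slice ending left of y / starting right of y); return values proved equal for len(A) ≥ 3.

-- ===== PORT A =====
def prefixSums (A : List Int) : List Int :=
  (PySem.List.pyRange 1 ((A.length : Int) + 1) 1).foldl
    (fun P k => PySem.List.pySetD P k (PySem.List.pyGetD P (k-1) 0 + PySem.List.pyGetD A (k-1) 0))
    (List.replicate (A.length + 1) 0)

def solution (A : List Int) : Int :=
  let n : Int := A.length
  let pref := prefixSums A
  (PySem.List.pyRange 0 (n-2) 1).foldl (fun acc x =>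
    (PySem.List.pyRange (x+1) (n-1) 1).foldl (fun acc y =>
      (PySem.List.pyRange (y+1) n 1).foldl (fun acc z =>
        max acc (PySem.List.pyGetD pref z 0 - PySem.List.pyGetD pref (x+1) 0 - PySem.List.pyGetD A y 0)) acc) acc)
    (-30000)

-- ===== PORT B =====
def solution_alt (A : List Int) : Int :=
  let n : Int := A.length
  let left := (PySem.List.pyRange 1 (n-1) 1).foldl
    (fun L i => PySem.List.pySetD L i (max 0 (PySem.List.pyGetD L (i-1) 0 + PySem.List.pyGetD A i 0)))
    (List.replicate A.length 0)
  let right := (PySem.List.pyRange (n-2) 0 (-1)).foldl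
    (fun R i => PySem.List.pySetD R i (max 0 (PySem.List.pyGetD R (i+1) 0 + PySem.List.pyGetD A i 0)))
    (List.replicate A.length 0)
  match (PySem.List.pyRange 1 (n-1) 1).map
      (fun y => PySem.List.pyGetD left (y-1) 0 + PySem.List.pyGetD right (y+1) 0) with
  | [] => 0          -- Python's max() raises ValueError here; unreachable under Pre_
  | v :: t => t.foldl max v

-- ===== PRECONDITION & SPEC =====
-- Pre_ excludes lists with fewer than 3 elements (no double slice exists there): A returns its
-- arbitrary sentinel -30000 on them, while B's max() over an empty generator raises ValueError.
def Pre_solution (A : List Int) : Prop := 3 ≤ A.length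
instance (A : List Int) : Decidable (Pre_solution A) := by unfold Pre_solution; infer_instance
def pvWitness_solution : List Int := ([1, 2, 3])
def Spec_solution (A : List Int) (out : Int) : Prop := out = solution_alt A
instance (A : List Int) (out : Int) : Decidable (Spec_solution A out) := by unfold Spec_solution; infer_instance

-- ===== CLAIM (what is proved, stated in full; the proofs are below) =====
def Claim_equal_solution : Prop := ∀ (A : List Int), Dom_solution A → Pre_solution A → Spec_solution A (solution A)

-- ===== LEMMAS AND PROOFS =====

-- prefix sum of the first k elements
def ps (A : List Int) (k : ℕ) : Int := (A.take k).sum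

-- max of f over the integer interval [a, b), assuming a < b (junk value f a if empty)
def rmax (f : Int → Int) (a b : Int) : Int :=
  (PySem.List.pyRange (a+1) b 1).foldl (fun m i => max m (f i)) (f a)

-- best left part for middle index y, best right part for middle index y, and B's value
def Lbest (A : List Int) (y : Int) : Int := rmax (fun x => ps A y.toNat - ps A (x+1).toNat) 0 y
def Rbest (A : List Int) (y : Int) : Int :=
  rmax (fun z => ps A z.toNat - ps A (y+1).toNat) (y+1) (A.length : Int)
def BV (A : List Int) : Int := rmax (fun y => Lbest A y + Rbest A y) 1 ((A.length : Int) - 1)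

theorem foldl_max_congr (l : List Int) (f g : Int → Int) (a b : Int) (hab : a = b)
    (h : ∀ i ∈ l, f i = g i) :
    l.foldl (fun m i => max m (f i)) a = l.foldl (fun m i => max m (g i)) b := by
  induction l generalizing a b with
  | nil => simpa using hab
  | cons x t ih =>
      simp only [List.foldl_cons]
      exact ih _ _ (by rw [hab, h x (by simp)]) (fun i hi => h i (by simp [hi]))

theorem foldl_max_acc (l : List Int) (f : Int → Int) (a c : Int) :
    l.foldl (fun m i => max m (f i)) (max a c) = max a (l.foldl (fun m i => max m (f i)) c) := by
  induction l generalizing c with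
  | nil => simp
  | cons x t ih => simp only [List.foldl_cons, max_assoc]; exact ih _

theorem foldl_max_add (l : List Int) (f : Int → Int) (c acc : Int) :
    l.foldl (fun m i => max m (f i + c)) (acc + c) = l.foldl (fun m i => max m (f i)) acc + c := by
  induction l generalizing acc with
  | nil => simp
  | cons x t ih =>
      simp only [List.foldl_cons]
      rw [show max (acc + c) (f x + c) = max acc (f x) + c from max_add_add_right acc (f x) c]
      exact ih _

theorem foldl_max_max (l : List Int) (f g : Int → Int) (a b : Int) :
    l.foldl (fun m i => max m (max (f i) (g i))) (max a b)
      = max (l.foldl (fun m i => max m (f i)) a) (l.foldl (fun m i => max m (g i)) b) := by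
  induction l generalizing a b with
  | nil => simp
  | cons x t ih =>
      simp only [List.foldl_cons]
      rw [show max (max a b) (max (f x) (g x)) = max (max a (f x)) (max b (g x)) by
        rw [max_max_max_comm]]
      exact ih _ _

theorem rmax_singleton (f : Int → Int) (a : Int) : rmax f a (a+1) = f a := by
  simp [rmax, PySem.List.pyRange_one_eq_nil le_rfl]

theorem rmax_succ (f : Int → Int) (a b : Int) (h : a < b) :
    rmax f a (b+1) = max (rmax f a b) (f b) := by
  unfold rmax
  rw [PySem.List.pyRange_one_succ_right (by omega : a + 1 ≤ b), List.foldl_append]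
  rfl

theorem rmax_cons (f : Int → Int) (a b : Int) (h : a + 1 < b) :
    rmax f a b = max (f a) (rmax f (a+1) b) := by
  unfold rmax
  rw [PySem.List.pyRange_one_cons h, List.foldl_cons]
  exact foldl_max_acc _ _ _ _

theorem rmax_congr (f g : Int → Int) (a b : Int) (hab : a < b)
    (h : ∀ i, a ≤ i → i < b → f i = g i) : rmax f a b = rmax g a b := by
  unfold rmax
  exact foldl_max_congr _ _ _ _ _ (h a le_rfl hab)
    (fun i hi => by
      rw [PySem.List.mem_pyRange_one] at hi
      exact h i (by omega) hi.2)

theorem rmax_add (f : Int → Int) (c a b : Int) :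
    rmax (fun i => f i + c) a b = rmax f a b + c := by
  unfold rmax
  exact foldl_max_add _ _ _ _

theorem rmax_max (f g : Int → Int) (a b : Int) :
    rmax (fun i => max (f i) (g i)) a b = max (rmax f a b) (rmax g a b) := by
  unfold rmax
  exact foldl_max_max _ _ _ _ _

theorem le_rmax_init (f : Int → Int) (a b : Int) : f a ≤ rmax f a b := by
  exact (PySem.List.le_foldl_max_int _ _ _).1

theorem foldmax_eq_rmax (f : Int → Int) (a b acc : Int) (h : a < b) :
    (PySem.List.pyRange a b 1).foldl (fun m i => max m (f i)) acc = max acc (rmax f a b) := by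
  rw [PySem.List.pyRange_one_cons h, List.foldl_cons]
  unfold rmax
  exact foldl_max_acc _ _ _ _

theorem rmax_exchange (g : Int → Int → Int) (n : ℕ) (hn : 1 ≤ n) :
    rmax (fun x => rmax (g x) (x+1) ((n : Int)+1)) 0 (n : Int)
      = rmax (fun y => rmax (fun x => g x y) 0 y) 1 ((n : Int)+1) := by
  induction n, hn using Nat.le_induction with
  | base =>
      have b1 : ∀ f : Int → Int, rmax f 0 1 = f 0 := fun f => by simpa using rmax_singleton f 0
      have b2 : ∀ f : Int → Int, rmax f 1 2 = f 1 := fun f => by simpa using rmax_singleton f 1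
      norm_num [b1, b2]
  | succ m hm ih =>
      have hm' : (1:Int) ≤ (m:Int) := by exact_mod_cast hm
      push_cast
      rw [rmax_succ _ 0 (m:Int) (by omega), rmax_succ _ 1 ((m:Int)+1) (by omega)]
      rw [rmax_congr (fun x => rmax (g x) (x+1) ((m:Int)+1+1))
            (fun x => max (rmax (g x) (x+1) ((m:Int)+1)) (g x ((m:Int)+1))) 0 (m:Int) (by omega)
            (fun i h0 h1 => rmax_succ (g i) (i+1) ((m:Int)+1) (by omega)),
          rmax_max, ih,
          rmax_succ (fun x => g x ((m:Int)+1)) 0 (m:Int) (by omega),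
          show rmax (g (m:Int)) ((m:Int)+1) ((m:Int)+1+1) = g (m:Int) ((m:Int)+1) from rmax_singleton _ _,
          max_assoc]

theorem ps_succ (A : List Int) (m : ℕ) (h : m < A.length) :
    ps A (m+1) = ps A m + A.getD m 0 := by
  simp only [ps, List.getD_eq_getElem?_getD, List.getElem?_eq_getElem h, Option.getD_some]
  rw [List.take_add_one, List.sum_append, List.getElem?_eq_getElem h]
  simp

theorem getD_eq_ps (A : List Int) (y : Int) (h0 : 0 ≤ y) (h1 : y < (A.length : Int)) :
    A.getD y.toNat 0 = ps A (y.toNat + 1) - ps A y.toNat := by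
  have hm : y.toNat < A.length := by omega
  rw [ps_succ A y.toNat hm]; ring

theorem prefixSums_inv (A : List Int) (m : ℕ) (hm : m ≤ A.length) :
    (PySem.List.pyRange 1 ((m:Int)+1) 1).foldl
      (fun P k => PySem.List.pySetD P k (PySem.List.pyGetD P (k-1) 0 + PySem.List.pyGetD A (k-1) 0))
      (List.replicate (A.length+1) 0)
    = (List.range (A.length+1)).map (fun k => if k ≤ m then ps A k else 0) := by
  induction m with
  | zero =>
      rw [show ((0:ℕ):Int)+1 = 1 by norm_num, PySem.List.pyRange_one_eq_nil le_rfl]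
      simp only [List.foldl_nil]
      have e : (fun k : ℕ => if k ≤ 0 then ps A k else 0) = fun _ => (0:Int) := by
        funext k; rcases k with _|k <;> simp [ps]
      rw [e, List.map_const', List.length_range]
  | succ m ih =>
      have hm' : m ≤ A.length := by omega
      have hml : m < A.length := by omega
      push_cast
      rw [PySem.List.pyRange_one_succ_right (by omega : (1:Int) ≤ (m:Int)+1), List.foldl_append,
          ih hm']
      simp only [List.foldl_cons, List.foldl_nil]
      have e1 : ((m:Int)+1-1) = (m:Int) := by ring
      rw [e1, PySem.List.pyGetD_natCast, PySem.List.pyGetD_natCast]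
      have hg : (List.map (fun k => if k ≤ m then ps A k else 0) (List.range (A.length+1))).getD m 0
          = ps A m := by
        simp [List.getD_eq_getElem?_getD, show m < A.length+1 by omega]
      rw [hg, show ps A m + A.getD m 0 = ps A (m+1) from (ps_succ A m hml).symm,
          PySem.List.pySetD_of_nonneg _ _ (by omega), show ((m:Int)+1).toNat = m+1 by omega]
      apply List.ext_getElem
      · simp
      · intro i h1 h2
        simp only [List.getElem_set, List.getElem_map, List.getElem_range]
        by_cases hi : i = m + 1
        · subst hi; simp
        · rw [if_neg (by omega)]
          by_cases him : i ≤ m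
          · rw [if_pos him, if_pos (by omega)]
          · rw [if_neg him, if_neg (by omega)]

theorem prefixSums_eq (A : List Int) :
    prefixSums A = (List.range (A.length + 1)).map (fun k => ps A k) := by
  unfold prefixSums
  rw [prefixSums_inv A A.length le_rfl]
  exact List.map_congr_left (fun k hk => by
    rw [List.mem_range] at hk
    simp [show k ≤ A.length by omega])

theorem pyGetD_psmap (A : List Int) (z : Int) (h0 : 0 ≤ z) (h1 : z ≤ (A.length : Int)) :
    PySem.List.pyGetD ((List.range (A.length + 1)).map (fun k => ps A k)) z 0 = ps A z.toNat := by
  rw [PySem.List.pyGetD_eq_getElem _ 0 h0 (by simp; omega)]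
  simp

theorem pyGetD_A_ps (A : List Int) (y : Int) (h0 : 0 ≤ y) (h1 : y < (A.length : Int)) :
    PySem.List.pyGetD A y 0 = ps A (y.toNat + 1) - ps A y.toNat := by
  have hm : y.toNat < A.length := by omega
  rw [PySem.List.pyGetD_eq_getElem A 0 h0 (by omega), ← List.getD_eq_getElem A 0 hm,
    getD_eq_ps A y h0 h1]

theorem Lbest_one (A : List Int) : Lbest A 1 = 0 := by
  have := rmax_singleton (fun x => ps A (1:Int).toNat - ps A (x+1).toNat) 0
  unfold Lbest
  simpa using this

theorem solution_eq_BV (A : List Int) (h : 3 ≤ A.length) : solution A = BV A := by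
  have hn : (3:Int) ≤ (A.length : Int) := by exact_mod_cast h
  set n : Int := (A.length : Int) with hn_def
  set g : Int → Int → Int :=
    fun x y => Rbest A y + ps A y.toNat - ps A (x+1).toNat with hg_def
  -- characterize the innermost z-loop
  have hz : ∀ x y : Int, 0 ≤ x → x + 1 ≤ y → y < n - 1 →
      rmax (fun z => PySem.List.pyGetD ((List.range (A.length + 1)).map (fun k => ps A k)) z 0
        - PySem.List.pyGetD ((List.range (A.length + 1)).map (fun k => ps A k)) (x+1) 0
        - PySem.List.pyGetD A y 0) (y+1) n = g x y := by
    intro x y hx0 hxy hy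
    rw [rmax_congr _ (fun z => (ps A z.toNat - ps A (y+1).toNat)
          + (ps A y.toNat - ps A (x+1).toNat)) (y+1) n (by omega)
        (fun z hz0 hz1 => by
          rw [pyGetD_psmap A z (by omega) (by omega), pyGetD_psmap A (x+1) (by omega) (by omega),
            pyGetD_A_ps A y (by omega) (by omega),
            show (y+1).toNat = y.toNat + 1 by omega]
          ring),
      rmax_add]
    simp only [hg_def, Rbest, ← hn_def]
    ring
  -- the triple loop equals max(-30000, nested rmax)
  have step1 : solution A
      = max (-30000) (rmax (fun x => rmax (g x) (x+1) (n-1)) 0 (n-2)) := by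
    simp only [solution, prefixSums_eq]
    rw [PySem.List.foldl_congr_mem _ _
        (fun acc x => max acc (rmax (g x) (x+1) (n-1))) _
        (fun acc x hx => by
          rw [PySem.List.mem_pyRange_one] at hx
          rw [PySem.List.foldl_congr_mem _ _
              (fun acc y => max acc (g x y)) _
              (fun acc y hy => by
                rw [PySem.List.mem_pyRange_one] at hy
                rw [foldmax_eq_rmax _ _ _ _ (by omega), hz x y (by omega) (by omega) (by omega)]),
            foldmax_eq_rmax _ _ _ _ (by omega)]),
      foldmax_eq_rmax _ _ _ _ (by omega)]
  -- exchange the two outer loops and fold in the left best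
  have hex := rmax_exchange g (A.length - 2) (by omega)
  rw [show (((A.length - 2 : ℕ)) : Int) + 1 = n - 1 by push_cast [show 2 ≤ A.length by omega]; ring,
      show (((A.length - 2 : ℕ)) : Int) = n - 2 by push_cast [show 2 ≤ A.length by omega]; ring] at hex
  have hy2 : ∀ y : Int, 1 ≤ y → y < n - 1 →
      rmax (fun x => g x y) 0 y = Lbest A y + Rbest A y := by
    intro y h1 h2
    rw [show (fun x => g x y) = fun x => Rbest A y + ps A y.toNat - ps A (x+1).toNat from rfl]
    rw [rmax_congr _ (fun x => (ps A y.toNat - ps A (x+1).toNat) + Rbest A y) 0 y (by omega)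
        (fun i h0 h1 => by ring), rmax_add]
    rfl
  rw [step1, hex, rmax_congr _ (fun y => Lbest A y + Rbest A y) 1 (n-1) (by omega)
      (fun y h1 h2 => hy2 y h1 h2)]
  -- the result is ≥ 0, so the -30000 start is absorbed
  have hB1 : Lbest A 1 + Rbest A 1 ≤ rmax (fun y => Lbest A y + Rbest A y) 1 (n-1) :=
    le_rmax_init _ 1 (n-1)
  have hR1 : (0:Int) ≤ Rbest A 1 := by
    have h0 := le_rmax_init (fun z => ps A z.toNat - ps A ((1:Int)+1).toNat) ((1:Int)+1) n
    simpa using h0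
  rw [Lbest_one] at hB1
  exact max_eq_right (by omega)

-- best right part as a function of its start index: Rf A i = Rbest A (i-1)
def Rf (A : List Int) (i : Int) : Int :=
  rmax (fun z => ps A z.toNat - ps A i.toNat) i (A.length : Int)

theorem Rbest_eq_Rf (A : List Int) (y : Int) : Rbest A y = Rf A (y+1) := rfl

theorem Rf_last (A : List Int) : Rf A ((A.length : Int) - 1) = 0 := by
  have e := rmax_singleton (fun z => ps A z.toNat - ps A ((A.length:Int)-1).toNat)
    ((A.length:Int)-1)
  rw [show ((A.length:Int)-1)+1 = (A.length:Int) by ring] at e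
  unfold Rf
  rw [e]
  simp

theorem Rf_rec (A : List Int) (i : ℕ) (h1 : 1 ≤ i) (h2 : i ≤ A.length - 2)
    (h3 : 3 ≤ A.length) :
    Rf A (i:Int) = max 0 (Rf A ((i:Int)+1) + (ps A (i+1) - ps A i)) := by
  unfold Rf
  have e := rmax_cons (fun z => ps A z.toNat - ps A ((i:Int)).toNat) (i:Int) (A.length:Int)
    (by omega)
  rw [e,
    rmax_congr _ (fun z => (ps A z.toNat - ps A ((i:Int)+1).toNat) + (ps A (i+1) - ps A i))
      ((i:Int)+1) (A.length:Int) (by omega)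
      (fun z hz0 hz1 => by
        rw [show ((i:Int)+1).toNat = i+1 by omega, show ((i:Int)).toNat = i by omega]
        ring),
    rmax_add]
  simp

theorem Lbest_rec (A : List Int) (i : ℕ) (h1 : 1 ≤ i) (h2 : i < A.length) :
    Lbest A ((i:Int)+1) = max 0 (Lbest A (i:Int) + (ps A (i+1) - ps A i)) := by
  unfold Lbest
  rw [rmax_succ _ 0 (i:Int) (by omega),
    rmax_congr _ (fun x => (ps A ((i:Int)).toNat - ps A (x+1).toNat) + (ps A (i+1) - ps A i))
      0 (i:Int) (by omega)
      (fun x h0 hx => by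
        rw [show ((i:Int)+1).toNat = i+1 by omega, show ((i:Int)).toNat = i by omega]
        ring),
    rmax_add]
  simp [show ((i:Int)+1).toNat = i+1 by omega, max_comm]

theorem left_inv (A : List Int) (h : 3 ≤ A.length) (m : ℕ) (hm : m ≤ A.length - 2) :
    (PySem.List.pyRange 1 ((m:Int)+1) 1).foldl
      (fun L i => PySem.List.pySetD L i
        (max 0 (PySem.List.pyGetD L (i-1) 0 + PySem.List.pyGetD A i 0)))
      (List.replicate A.length 0)
    = (List.range A.length).map (fun i => if 1 ≤ i ∧ i ≤ m then Lbest A ((i:Int)+1) else 0) := by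
  induction m with
  | zero =>
      rw [show ((0:ℕ):Int)+1 = 1 by norm_num, PySem.List.pyRange_one_eq_nil le_rfl]
      simp only [List.foldl_nil]
      have e : (fun i : ℕ => if 1 ≤ i ∧ i ≤ 0 then Lbest A ((i:Int)+1) else 0)
          = fun _ => (0:Int) := by
        funext i
        rw [if_neg (by omega)]
      rw [e, List.map_const', List.length_range]
  | succ m ih =>
      have hm' : m ≤ A.length - 2 := by omega
      push_cast
      rw [PySem.List.pyRange_one_succ_right (by omega : (1:Int) ≤ (m:Int)+1), List.foldl_append,
          ih hm']
      simp only [List.foldl_cons, List.foldl_nil]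
      have e1 : ((m:Int)+1-1) = (m:Int) := by ring
      rw [e1, PySem.List.pyGetD_natCast]
      have hgm : ((List.range A.length).map
            (fun i => if 1 ≤ i ∧ i ≤ m then Lbest A ((i:Int)+1) else 0)).getD m 0
          = Lbest A ((m:Int)+1) := by
        rw [List.getD_eq_getElem _ _ (by simp; omega)]
        simp only [List.getElem_map, List.getElem_range]
        rcases Nat.eq_zero_or_pos m with h0 | h0
        · subst h0
          rw [if_neg (by omega)]
          norm_num [Lbest_one]
        · rw [if_pos ⟨h0, le_rfl⟩]
      rw [hgm, pyGetD_A_ps A ((m:Int)+1) (by omega) (by omega),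
          show ((m:Int)+1).toNat = m+1 by omega,
          show max 0 (Lbest A ((m:Int)+1) + (ps A (m+1+1) - ps A (m+1)))
              = Lbest A ((m:Int)+1+1) from by
            have := Lbest_rec A (m+1) (by omega) (by omega)
            push_cast at this
            rw [this],
          PySem.List.pySetD_of_nonneg _ _ (by omega), show ((m:Int)+1).toNat = m+1 by omega]
      apply List.ext_getElem
      · simp
      · intro i hi1 hi2
        simp only [List.getElem_set, List.getElem_map, List.getElem_range]
        by_cases hie : i = m + 1
        · subst hie
          rw [if_pos rfl, if_pos (by omega)]
          congr 1
        · rw [if_neg (by omega)]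
          by_cases him : 1 ≤ i ∧ i ≤ m
          · rw [if_pos him, if_pos (by omega)]
          · rw [if_neg him, if_neg (by omega)]

theorem right_inv (A : List Int) (h : 3 ≤ A.length) (m : ℕ) (hm : m ≤ A.length - 2) :
    (PySem.List.pyRange (m:Int) 0 (-1)).foldl
      (fun R i => PySem.List.pySetD R i
        (max 0 (PySem.List.pyGetD R (i+1) 0 + PySem.List.pyGetD A i 0)))
      ((List.range A.length).map
        (fun i => if m+1 ≤ i ∧ i ≤ A.length-2 then Rf A (i:Int) else 0))
    = (List.range A.length).map (fun i => if 1 ≤ i ∧ i ≤ A.length-2 then Rf A (i:Int) else 0) := by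
  induction m with
  | zero =>
      rw [show ((0:ℕ):Int) = 0 by norm_num, PySem.List.pyRange_neg_one_eq_nil le_rfl]
      simp only [List.foldl_nil]
  | succ m ih =>
      have hm' : m ≤ A.length - 2 := by omega
      push_cast
      rw [PySem.List.pyRange_neg_one_cons (by omega : (0:Int) < (m:Int)+1), List.foldl_cons]
      have hstep : (PySem.List.pySetD
            ((List.range A.length).map
              (fun i => if m+1+1 ≤ i ∧ i ≤ A.length-2 then Rf A (i:Int) else 0))
            ((m:Int)+1)
            (max 0 (PySem.List.pyGetD
              ((List.range A.length).map
                (fun i => if m+1+1 ≤ i ∧ i ≤ A.length-2 then Rf A (i:Int) else 0))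
              ((m:Int)+1+1) 0 + PySem.List.pyGetD A ((m:Int)+1) 0)))
          = (List.range A.length).map
              (fun i => if m+1 ≤ i ∧ i ≤ A.length-2 then Rf A (i:Int) else 0) := by
        have hg2 : PySem.List.pyGetD
            ((List.range A.length).map
              (fun i => if m+1+1 ≤ i ∧ i ≤ A.length-2 then Rf A (i:Int) else 0))
            ((m:Int)+1+1) 0 = Rf A ((m:Int)+1+1) := by
          rw [PySem.List.pyGetD_eq_getElem _ 0 (by omega) (by simp; omega)]
          simp only [show (((m:Int)+1+1)).toNat = m+2 from by omega]
          simp only [List.getElem_map, List.getElem_range]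
          by_cases hc : m+2 ≤ A.length-2
          · rw [if_pos ⟨by omega, hc⟩]
            congr 1
          · rw [if_neg (by omega),
              show ((m:Int)+1+1) = (A.length:Int)-1 by omega, Rf_last A]
        rw [hg2, pyGetD_A_ps A ((m:Int)+1) (by omega) (by omega),
            show ((m:Int)+1).toNat = m+1 by omega,
            show max 0 (Rf A ((m:Int)+1+1) + (ps A (m+1+1) - ps A (m+1)))
                = Rf A ((m:Int)+1) from by
              have := Rf_rec A (m+1) (by omega) (by omega) h
              push_cast at this
              rw [this],
            PySem.List.pySetD_of_nonneg _ _ (by omega),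
            show ((m:Int)+1).toNat = m+1 by omega]
        apply List.ext_getElem
        · simp
        · intro i hi1 hi2
          simp only [List.getElem_set, List.getElem_map, List.getElem_range]
          by_cases hie : i = m + 1
          · subst hie
            rw [if_pos rfl, if_pos (by omega)]
            congr 1
          · rw [if_neg (by omega)]
            by_cases him : m+1+1 ≤ i ∧ i ≤ A.length-2
            · rw [if_pos him, if_pos (by omega)]
            · rw [if_neg him, if_neg (by omega)]
      rw [hstep, show ((m:Int)+1-1) = (m:Int) from by ring]
      exact ih hm'

theorem solution_alt_eq_BV (A : List Int) (h : 3 ≤ A.length) : solution_alt A = BV A := by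
  have hn : (3:Int) ≤ (A.length:Int) := by exact_mod_cast h
  have hleft : (PySem.List.pyRange 1 ((A.length:Int)-1) 1).foldl
      (fun L i => PySem.List.pySetD L i
        (max 0 (PySem.List.pyGetD L (i-1) 0 + PySem.List.pyGetD A i 0)))
      (List.replicate A.length 0)
      = (List.range A.length).map
          (fun i => if 1 ≤ i ∧ i ≤ A.length-2 then Lbest A ((i:Int)+1) else 0) := by
    have e := left_inv A h (A.length-2) le_rfl
    rw [show (((A.length-2:ℕ)):Int)+1 = (A.length:Int)-1 from by
      push_cast [show 2 ≤ A.length from by omega]; ring] at e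
    exact e
  have hrep : (List.replicate A.length (0:Int))
      = (List.range A.length).map
          (fun i => if (A.length-2)+1 ≤ i ∧ i ≤ A.length-2 then Rf A (i:Int) else 0) := by
    have e : (fun i : ℕ => if (A.length-2)+1 ≤ i ∧ i ≤ A.length-2 then Rf A (i:Int) else 0)
        = fun _ => (0:Int) := by
      funext i
      rw [if_neg (by omega)]
    rw [e, List.map_const', List.length_range]
  have hright : (PySem.List.pyRange ((A.length:Int)-2) 0 (-1)).foldl
      (fun R i => PySem.List.pySetD R i
        (max 0 (PySem.List.pyGetD R (i+1) 0 + PySem.List.pyGetD A i 0)))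
      (List.replicate A.length 0)
      = (List.range A.length).map
          (fun i => if 1 ≤ i ∧ i ≤ A.length-2 then Rf A (i:Int) else 0) := by
    rw [hrep, show ((A.length:Int)-2) = (((A.length-2:ℕ)):Int) from by
      push_cast [show 2 ≤ A.length from by omega]; ring]
    exact right_inv A h (A.length-2) le_rfl
  have hpt : ∀ y : Int, 1 ≤ y → y < (A.length:Int)-1 →
      PySem.List.pyGetD ((List.range A.length).map
          (fun i => if 1 ≤ i ∧ i ≤ A.length-2 then Lbest A ((i:Int)+1) else 0)) (y-1) 0
        + PySem.List.pyGetD ((List.range A.length).map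
          (fun i => if 1 ≤ i ∧ i ≤ A.length-2 then Rf A (i:Int) else 0)) (y+1) 0
      = Lbest A y + Rbest A y := by
    intro y h1 h2
    have hL : PySem.List.pyGetD ((List.range A.length).map
        (fun i => if 1 ≤ i ∧ i ≤ A.length-2 then Lbest A ((i:Int)+1) else 0)) (y-1) 0
        = Lbest A y := by
      rw [PySem.List.pyGetD_eq_getElem _ 0 (by omega) (by simp; omega)]
      simp only [List.getElem_map, List.getElem_range]
      by_cases hy2 : 2 ≤ y
      · rw [if_pos ⟨by omega, by omega⟩]
        congr 1
        omega
      · have hy1 : y = 1 := by omega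
        subst hy1
        rw [if_neg (by omega)]
        exact (Lbest_one A).symm
    have hR : PySem.List.pyGetD ((List.range A.length).map
        (fun i => if 1 ≤ i ∧ i ≤ A.length-2 then Rf A (i:Int) else 0)) (y+1) 0
        = Rbest A y := by
      rw [PySem.List.pyGetD_eq_getElem _ 0 (by omega) (by simp; omega)]
      simp only [List.getElem_map, List.getElem_range]
      by_cases hy2 : y+1 ≤ (A.length:Int)-2
      · rw [if_pos ⟨by omega, by omega⟩, Rbest_eq_Rf]
        congr 1
        omega
      · rw [if_neg (by omega), Rbest_eq_Rf, show y+1 = (A.length:Int)-1 from by omega, Rf_last A]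
    rw [hL, hR]
  simp only [solution_alt]
  rw [hleft, hright,
    PySem.List.pyRange_one_cons (by omega : (1:Int) < (A.length:Int)-1), List.map_cons]
  show ((PySem.List.pyRange (1+1) ((A.length:Int)-1) 1).map _).foldl max _ = BV A
  rw [List.foldl_map]
  have grmax : rmax (fun y =>
      PySem.List.pyGetD ((List.range A.length).map
          (fun i => if 1 ≤ i ∧ i ≤ A.length-2 then Lbest A ((i:Int)+1) else 0)) (y-1) 0
        + PySem.List.pyGetD ((List.range A.length).map
          (fun i => if 1 ≤ i ∧ i ≤ A.length-2 then Rf A (i:Int) else 0)) (y+1) 0)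
      1 ((A.length:Int)-1) = BV A := by
    rw [rmax_congr _ (fun y => Lbest A y + Rbest A y) 1 ((A.length:Int)-1) (by omega)
      (fun y hy1 hy2 => hpt y hy1 hy2)]
    rfl
  exact grmax

-- ===== VERDICT (by name: the statement is the Claim_ definition above) =====
theorem solution_spec : Claim_equal_solution := by
  intro A _ hpre
  unfold Spec_solution
  rw [solution_eq_BV A hpre, solution_alt_eq_BV A hpre]
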